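-- pv_equiv track=rewrite | github.com/mo9mo9-uwu-mo9mo9/Kumihan-Formatter | kumihan_formatter/streaming_parser.py | _split_text_streaming
-- ===== SOURCE A (Python) =====
-- from typing import Any, Callable, Iterator, Optional, cast
--
-- def _split_text_streaming(text: str) -> Iterator[str]:
--     """テキストを行単位でストリーミング分割（メモリ効率版）"""
--     start = 0
--     for i, char in enumerate(text):
--         if char == "\n":
--             yield text[start:i]
--             start = i + 1
--
--     # 最後の行（改行なしの場合）
--     if start < len(text):
--         yield text[start:]
-- ===== SOURCE B (Python) =====
-- from typing import Iterator
--
-- def _split_text_streaming(text: str) -> Iterator[str]: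
--     parts = text.split("\n")
--     if parts and parts[-1] == "":
--         parts.pop()
--     yield from parts
-- ===== Notes on version B (the rewrite author's own statement) =====
-- stated objective: simpler
-- what changed: Replaces the manual index-tracking character scan that yields slices with a single str.split on the newline separator followed by popping the one trailing empty segment.
import Mathlib
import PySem

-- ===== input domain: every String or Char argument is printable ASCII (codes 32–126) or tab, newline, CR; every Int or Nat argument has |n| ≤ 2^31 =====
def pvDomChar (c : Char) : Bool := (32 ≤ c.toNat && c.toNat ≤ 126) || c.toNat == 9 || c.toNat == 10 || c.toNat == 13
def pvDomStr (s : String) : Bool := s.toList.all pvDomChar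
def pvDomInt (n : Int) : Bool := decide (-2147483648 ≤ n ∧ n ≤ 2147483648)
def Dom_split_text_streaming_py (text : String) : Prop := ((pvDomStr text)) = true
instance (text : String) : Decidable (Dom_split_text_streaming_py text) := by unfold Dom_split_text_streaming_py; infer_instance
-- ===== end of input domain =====

-- B replaces A's manual index-tracking newline scan (absolute slice bounds) by a single
-- str.split on the newline separator followed by popping the one trailing empty segment;
-- objective: simpler (a timing run also measured it faster, a constant-factor gain).

-- ===== PORT A =====
-- the 'for i, char in enumerate(text)' loop, state = (start, lines yielded so far)
def splitLoopA (text : String) : List (Int × Char) → Int × List String → Int × List String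
  | [], st => st
  | (i, c) :: rest, st =>
    if c = '\n' then
      splitLoopA text rest (i + 1, st.2 ++ [PySem.Str.slice text (some st.1) (some i)])
    else splitLoopA text rest st

def split_text_streaming_py (text : String) : List String :=
  let st := splitLoopA text (PySem.List.enumerate text.toList) (0, [])
  if st.1 < PySem.Str.len text then st.2 ++ [PySem.Str.slice text (some st.1) none] else st.2

-- ===== PORT B =====
def split_text_streaming_py_alt (text : String) : List String :=
  let parts := (PySem.Str.split? text "\n").getD []
  if parts.getLast? == some "" then parts.dropLast else parts

-- ===== PRECONDITION & SPEC =====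
def Spec_split_text_streaming_py (text : String) (out : List String) : Prop := out = split_text_streaming_py_alt text
instance (text : String) (out : List String) : Decidable (Spec_split_text_streaming_py text out) := by unfold Spec_split_text_streaming_py; infer_instance

-- ===== CLAIM (what is proved, stated in full; the proofs are below) =====
def Claim_equal_split_text_streaming_py : Prop := ∀ (text : String), Dom_split_text_streaming_py text → Spec_split_text_streaming_py text (split_text_streaming_py text)

-- ===== LEMMAS AND PROOFS =====

-- reference splitter on char lists: segments between '\n's, `pre` the pending segment
def mySplit (pre : List Char) : List Char → List (List Char)
  | [] => [pre]
  | c :: rest => if c = '\n' then pre :: mySplit [] rest else mySplit (pre ++ [c]) rest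

lemma mySplit_ne_nil (pre l) : mySplit pre l ≠ [] := by
  induction l generalizing pre with
  | nil => simp [mySplit]
  | cons c rest ih => by_cases h : c = '\n' <;> simp [mySplit, h, ih]

lemma splitOn_go_eq (fuel : Nat) : ∀ (l cur : List Char) (acc : List (List Char)),
    l.length < fuel →
    PySem.Chars.splitOn.go ['\n'] fuel l cur acc = acc.reverse ++ mySplit cur.reverse l := by
  induction fuel with
  | zero => intro l cur acc h; omega
  | succ fuel ih =>
    intro l cur acc h
    cases l with
    | nil => simp [PySem.Chars.splitOn.go, mySplit]
    | cons c rest =>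
      by_cases hc : c = '\n'
      · subst hc
        simp only [PySem.Chars.splitOn.go, List.isPrefixOf, beq_self_eq_true, Bool.true_and,
          if_true]
        rw [ih _ _ _ (by simp at h ⊢; omega)]
        simp [mySplit]
      · simp only [PySem.Chars.splitOn.go]
        rw [if_neg (by simp [List.isPrefixOf]; exact fun h => hc h.symm)]
        rw [ih _ _ _ (by simp at h ⊢; omega)]
        simp [mySplit, hc]

lemma splitOn_eq (cs : List Char) : PySem.Chars.splitOn cs ['\n'] = mySplit [] cs := by
  rw [PySem.Chars.splitOn, splitOn_go_eq (cs.length + 1) cs [] [] (by omega)]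
  simp

lemma mySplit_getLast_suffix (l pre : List Char) :
    (mySplit pre l).getLast (mySplit_ne_nil pre l) <:+ pre ++ l := by
  induction l generalizing pre with
  | nil => simp [mySplit]
  | cons c rest ih =>
    by_cases hc : c = '\n'
    · subst hc
      have h2 := mySplit_ne_nil ([] : List Char) rest
      simp only [mySplit, if_true, List.getLast_cons h2]
      exact (ih []).trans ⟨pre ++ ['\n'], by simp⟩
    · simpa [mySplit, hc] using ih (pre ++ [c])

-- loop invariant for A's scan
lemma splitLoopA_spec (text : String) : ∀ (suffix : List Char) (k s : Nat) (acc : List String),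
    s ≤ k → s ≤ text.toList.length → text.toList.drop k = suffix →
    splitLoopA text (PySem.List.enumerate suffix (k : Int)) ((s : Int), acc) =
      (((text.toList.length : Int) -
          ((mySplit ((text.toList.drop s).take (k - s)) suffix).getLast
            (mySplit_ne_nil _ _)).length),
       acc ++ ((mySplit ((text.toList.drop s).take (k - s)) suffix).dropLast).map String.ofList) := by
  intro suffix
  induction suffix with
  | nil =>
    intro k s acc hsk hsn hdrop
    have hkn : text.toList.length ≤ k := by
      by_contra h
      have := List.drop_eq_nil_iff.mp hdrop
      omega
    have hcur : (text.toList.drop s).take (k - s) = text.toList.drop s := by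
      apply List.take_of_length_le; rw [List.length_drop]; omega
    simp only [PySem.List.enumerate_nil, splitLoopA, hcur, mySplit]
    have hlen : (text.toList.drop s).length = text.toList.length - s := by simp
    simp only [Prod.mk.injEq]
    refine ⟨?_, by simp⟩
    simp only [List.getLast_singleton, hlen]
    omega
  | cons c rest ih =>
    intro k s acc hsk hsn hdrop
    have hkn : k < text.toList.length := by
      by_contra h
      have : text.toList.drop k = [] := List.drop_eq_nil_iff.mpr (by omega)
      rw [hdrop] at this; simp at this
    have hrest : text.toList.drop (k + 1) = rest := by
      have := congrArg (List.drop 1) hdrop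
      simpa [List.drop_drop, Nat.add_comm] using this
    have hgetk : text.toList[k]? = some c := by
      have := congrArg (fun l => l[0]?) hdrop
      simpa [List.getElem?_drop] using this
    rw [PySem.List.enumerate_cons]
    by_cases hc : c = '\n'
    · subst hc
      simp only [splitLoopA]
      have hcast : (k : Int) + 1 = ((k + 1 : Nat) : Int) := by push_cast; ring
      rw [hcast, ih (k + 1) (k + 1) _ (le_refl _) (by omega) hrest]
      have hcur0 : (text.toList.drop (k + 1)).take (k + 1 - (k + 1)) = [] := by simp
      have hslice : PySem.Str.slice text (some (s : Int)) (some (k : Int)) =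
          String.ofList ((text.toList.drop s).take (k - s)) := by
        apply String.toList_inj.mp
        rw [PySem.Str.toList_slice, PySem.Chars.slice_eq_listSlice, PySem.List.slice_natCast,
          String.toList_ofList]
      rw [hcur0, hslice]
      have hne := mySplit_ne_nil ([] : List Char) rest
      simp [mySplit, List.getLast_cons hne, List.dropLast_cons_of_ne_nil hne]
    · simp only [splitLoopA, if_neg hc]
      have hcast : (k : Int) + 1 = ((k + 1 : Nat) : Int) := by push_cast; ring
      rw [hcast, ih (k + 1) s _ (by omega) hsn hrest]
      have hcur : (text.toList.drop s).take (k + 1 - s) =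
          (text.toList.drop s).take (k - s) ++ [c] := by
        have h1 : k + 1 - s = (k - s) + 1 := by omega
        have h2 : (text.toList.drop s)[k - s]? = some c := by
          rw [List.getElem?_drop]
          have : s + (k - s) = k := by omega
          rw [this, hgetk]
        rw [h1, List.take_add_one, h2]; rfl
      rw [hcur]
      simp only [mySplit, if_neg hc]

-- the last segment of the split is the final suffix of the text
lemma drop_of_suffix {α : Type} (l t : List α) (h : t <:+ l) :
    l.drop (l.length - t.length) = t := by
  obtain ⟨m, hm⟩ := h
  subst hm
  simp

theorem split_text_streaming_py_spec : Claim_equal_split_text_streaming_py := by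
  intro text _
  unfold Spec_split_text_streaming_py split_text_streaming_py split_text_streaming_py_alt
  have hloop := splitLoopA_spec text text.toList 0 0 [] le_rfl (by omega) (by simp)
  simp only [Nat.cast_zero, Nat.sub_zero, List.drop_zero, List.take_zero, List.nil_append] at hloop
  rw [show PySem.List.enumerate text.toList = PySem.List.enumerate text.toList (0 : Int) from rfl,
    hloop]
  have hne : mySplit [] text.toList ≠ [] := mySplit_ne_nil [] text.toList
  set segs := mySplit [] text.toList with hsegs
  set L := segs.getLast hne with hL
  have hsuf : L <:+ text.toList := by
    have := mySplit_getLast_suffix text.toList []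
    simpa [hL, hsegs] using this
  have hLlen : L.length ≤ text.toList.length := hsuf.length_le
  -- B side: parts = segs.map ofList
  have hsplit : PySem.Chars.split? text.toList ['\n'] = some segs := by
    rw [PySem.Chars.split?]
    simp [splitOn_eq, hsegs]
  have hmapB : (PySem.Str.split? text "\n").map (List.map String.toList) = some segs := by
    rw [PySem.Str.split?_map]
    simpa using hsplit
  obtain ⟨parts, hparts, hparts2⟩ : ∃ parts, PySem.Str.split? text "\n" = some parts ∧
      parts.map String.toList = segs := by
    cases hp : PySem.Str.split? text "\n" with
    | none => rw [hp] at hmapB; simp at hmapB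
    | some parts => rw [hp] at hmapB; exact ⟨parts, rfl, by simpa using hmapB⟩
  have hpartsEq : parts = segs.map String.ofList := by
    rw [← hparts2, List.map_map]
    have : String.ofList ∘ String.toList = id := by
      funext x; simp [Function.comp]
    simp [this]
  rw [hparts]
  simp only [Option.getD_some]
  have hlast : parts.getLast? = some (String.ofList L) := by
    rw [hpartsEq, List.getLast?_map, List.getLast?_eq_some_getLast hne]
    rfl
  by_cases hLnil : L = []
  · -- trailing empty segment: A's final 'if' is false, B pops it
    have hcond : ¬ ((text.toList.length : Int) - (L.length : Int) < PySem.Str.len text) := by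
      rw [PySem.Str.len_eq]; simp [hLnil]
    rw [if_neg hcond]
    have : (parts.getLast? == some "") = true := by
      rw [hlast, hLnil]; rfl
    rw [if_pos this, hpartsEq, ← List.map_dropLast]
  · -- no trailing empty segment: A appends the final slice, B keeps parts whole
    have hLpos : 0 < L.length := List.length_pos_iff.mpr hLnil
    have hcond : (text.toList.length : Int) - (L.length : Int) < PySem.Str.len text := by
      rw [PySem.Str.len_eq]; omega
    rw [if_pos hcond]
    have hslice : PySem.Str.slice text (some ((text.toList.length : Int) - (L.length : Int))) none
        = String.ofList L := by
      apply String.toList_inj.mp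
      have h0le : (0 : Int) ≤ (text.toList.length : Int) - (L.length : Int) := by omega
      rw [PySem.Str.toList_slice, PySem.Chars.slice_eq_listSlice, String.toList_ofList]
      rw [PySem.List.slice_from text.toList h0le]
      have : ((text.toList.length : Int) - (L.length : Int)).toNat =
          text.toList.length - L.length := by omega
      rw [this, drop_of_suffix _ _ hsuf]
    have hfalse : (parts.getLast? == some "") = false := by
      rw [hlast]
      simp only [beq_eq_false_iff_ne, ne_eq, Option.some.injEq]
      intro h
      exact hLnil (by simpa using congrArg String.toList h)
    rw [if_neg (by simp [hfalse]), hslice, hpartsEq]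
    have hsegs2 : segs.dropLast ++ [L] = segs := List.dropLast_append_getLast hne
    conv_rhs => rw [← hsegs2]
    simp
    rw [← hsegs]
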